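-- pv_equiv track=rewrite | github.com/LXF-DX3906/DataMiningA1-K-means | method1/method1.py | coordinate
-- ===== SOURCE A (Python) =====
-- def coordinate(pluno_list, fourth_classification_info):
--     codi = {}
--     for index in fourth_classification_info:
--         codi[index] = []
--         for item in pluno_list:
--             if item not in list(fourth_classification_info[index].keys()):
--                 codi[index].append(0)
--             else:
--                 codi[index].append(fourth_classification_info[index][item])
--     return codi
-- ===== SOURCE B (Python) =====
-- def coordinate(pluno_list, fourth_classification_info):
--     pos = {}
--     for i, item in enumerate(pluno_list):
--         pos[item] = pos.get(item, []) + [i]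
--     codi = {}
--     for index, d in fourth_classification_info.items():
--         vec = [0] * len(pluno_list)
--         for item, value in d.items():
--             for p in pos.get(item, []):
--                 vec[p] = value
--         codi[index] = vec
--     return codi
-- ===== Notes on version B (the rewrite author's own statement) =====
-- stated objective: faster
-- what changed: A densely scans every item of pluno_list against a freshly rebuilt list of each class dict's keys; B builds one position index over pluno_list once and scatters each class's sparse (item,value) pairs into a zero vector, removing the per-item key-list rebuild and membership scan.
import Mathlib
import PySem

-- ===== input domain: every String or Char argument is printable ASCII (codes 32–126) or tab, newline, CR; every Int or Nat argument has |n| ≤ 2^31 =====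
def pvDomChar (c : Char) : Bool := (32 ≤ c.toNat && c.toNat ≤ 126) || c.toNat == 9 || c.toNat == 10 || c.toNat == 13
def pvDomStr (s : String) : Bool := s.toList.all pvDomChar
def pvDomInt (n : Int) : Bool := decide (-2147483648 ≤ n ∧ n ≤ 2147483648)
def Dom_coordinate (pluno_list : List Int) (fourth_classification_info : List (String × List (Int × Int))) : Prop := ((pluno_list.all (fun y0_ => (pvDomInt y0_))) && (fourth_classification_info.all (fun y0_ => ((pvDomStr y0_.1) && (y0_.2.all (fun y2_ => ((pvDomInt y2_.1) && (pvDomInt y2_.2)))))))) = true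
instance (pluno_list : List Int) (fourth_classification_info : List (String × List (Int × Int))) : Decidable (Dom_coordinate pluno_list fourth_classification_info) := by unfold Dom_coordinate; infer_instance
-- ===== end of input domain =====

-- B replaces A's per-item rebuild-and-scan of each class dict's key list by one position index over
-- pluno_list and a sparse scatter of each class's (item, value) pairs into a zero vector (objective: faster).

-- ===== PORT A =====
-- literal port of A; `codi[index] = []` followed by in-place appends is ported as inserting the
-- row built by the inner fold; `fourth_classification_info[index]` is the dict lookup (it always
-- hits, since index ranges over the keys, so the `.getD []` totalisation is never used).
def coordinate (pluno_list : List Int) (fourth_classification_info : List (String × List (Int × Int))) : List (String × List Int) :=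
  let fciD : PySem.Dict String (List (Int × Int)) := PySem.Dict.mk fourth_classification_info
  (fciD.keys.foldl (fun codi index =>
      let d : List (Int × Int) := (fciD.get? index).getD []
      codi.insert index (pluno_list.foldl (fun row item =>
        if (d.map Prod.fst).contains item = false then row ++ [0]
        else row ++ [((PySem.Dict.mk d).get? item).getD 0]) []))
    PySem.Dict.empty).items

-- ===== PORT B =====
-- literal port of Source B: pos[item] = pos.get(item, []) + [i] over enumerate(pluno_list), then per
-- class a zero vector into which each (item, value) pair is scattered at positions pos.get(item, []).
def coordinate_alt (pluno_list : List Int) (fourth_classification_info : List (String × List (Int × Int))) : List (String × List Int) :=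
  let pos : PySem.Dict Int (List Int) :=
    (PySem.List.enumerate pluno_list).foldl
      (fun pos pr => pos.modify pr.2 [] (fun l => l ++ [pr.1])) PySem.Dict.empty
  fourth_classification_info.foldl (fun codi pr =>
    let vec : List Int := pr.2.foldl
      (fun vec q => (pos.getD q.1 []).foldl (fun v p => PySem.List.pySetD v p q.2) vec)
      (List.replicate pluno_list.length 0)
    codi ++ [(pr.1, vec)]) []

-- ===== PRECONDITION & SPEC =====
-- Pre_ only requires the two dict-valued arguments (the outer dict and each inner class dict,
-- which arrive here as association lists) to have pairwise-distinct keys: duplicate keys cannot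
-- arise from a Python dict, so no input the Python A returns on is excluded.
def Pre_coordinate (_pluno_list : List Int) (fourth_classification_info : List (String × List (Int × Int))) : Prop :=
  (fourth_classification_info.map Prod.fst).Nodup ∧
  ∀ pr ∈ fourth_classification_info, (pr.2.map Prod.fst).Nodup
instance (pluno_list : List Int) (fourth_classification_info : List (String × List (Int × Int))) : Decidable (Pre_coordinate pluno_list fourth_classification_info) := by unfold Pre_coordinate; infer_instance
def pvWitness_coordinate : List Int × (List (String × List (Int × Int))) :=
  ([1, 2, 1], [("a", [(1, 5)]), ("b", [(2, 7), (3, 9)])])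
def Spec_coordinate (pluno_list : List Int) (fourth_classification_info : List (String × List (Int × Int))) (out : List (String × List Int)) : Prop := out = coordinate_alt pluno_list fourth_classification_info
instance (pluno_list : List Int) (fourth_classification_info : List (String × List (Int × Int))) (out : List (String × List Int)) : Decidable (Spec_coordinate pluno_list fourth_classification_info out) := by unfold Spec_coordinate; infer_instance

-- ===== CLAIM (what is proved, stated in full; the proofs are below) =====
def Claim_equal_coordinate : Prop := ∀ (pluno_list : List Int) (fourth_classification_info : List (String × List (Int × Int))), Dom_coordinate pluno_list fourth_classification_info → Pre_coordinate pluno_list fourth_classification_info → Spec_coordinate pluno_list fourth_classification_info (coordinate pluno_list fourth_classification_info)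

-- ===== LEMMAS AND PROOFS =====

-- the common normal form both sides are reduced to: one dense row per class, looked up per item
def pvRow (pluno_list : List Int) (d : List (Int × Int)) : List Int :=
  pluno_list.map (fun x => ((PySem.Dict.mk d).get? x).getD 0)

-- B's position index, as built by coordinate_alt
def pvPos (pluno_list : List Int) : PySem.Dict Int (List Int) :=
  (PySem.List.enumerate pluno_list).foldl
    (fun pos pr => pos.modify pr.2 [] (fun l => l ++ [pr.1])) PySem.Dict.empty

theorem pvPos_mem (pl : List Int) (x j : Int) :
    j ∈ (pvPos pl).getD x [] ↔ ∃ (k : Nat), (∃ (_ : k < pl.length), pl[k] = x) ∧ j = (k : Int) := by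
  have h1 : pvPos pl
      = ((PySem.List.enumerate pl).map (fun pr => (pr.2, pr.1))).foldl
        (fun pos p => pos.modify p.1 [] (fun l => l ++ [p.2])) PySem.Dict.empty := by
    unfold pvPos; rw [List.foldl_map]
  rw [h1, PySem.Dict.getD_foldl_modify_append]
  simp only [PySem.Dict.getD_empty, List.nil_append, List.mem_map, List.mem_filter,
    PySem.List.mem_enumerate_iff, zero_add, Prod.exists, Prod.mk.injEq, exists_and_left, beq_iff_eq, exists_eq_right]
  constructor
  · rintro ⟨a, b, ⟨k, rfl, hk, rfl⟩, rfl, rfl⟩; exact ⟨k, ⟨hk, rfl⟩, rfl⟩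
  · rintro ⟨k, ⟨hk, rfl⟩, rfl⟩; exact ⟨k, pl[k], ⟨k, rfl, hk, rfl⟩, rfl, rfl⟩

theorem pvPos_nonneg (pl : List Int) (x : Int) : ∀ j ∈ (pvPos pl).getD x [], 0 ≤ j := by
  intro j hj
  rcases (pvPos_mem pl x j).1 hj with ⟨k, _, rfl⟩
  exact Int.natCast_nonneg k

theorem setAll_getElem? (value : Int) : ∀ (ps : List Int) (vec : List Int) (n : Nat),
    (∀ p ∈ ps, 0 ≤ p) →
    (ps.foldl (fun v p => PySem.List.pySetD v p value) vec)[n]? =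
      if (n : Int) ∈ ps then vec[n]?.map (fun _ => value) else vec[n]? := by
  intro ps
  induction ps with
  | nil => intro vec n _; simp
  | cons p ps ih =>
    intro vec n hpos
    simp only [List.foldl_cons]
    rw [ih _ n (fun q hq => hpos q (List.mem_cons_of_mem _ hq))]
    have hp0 : 0 ≤ p := hpos p (List.mem_cons_self ..)
    have hset : (PySem.List.pySetD vec p value) = vec.set p.toNat value := by
      simp [PySem.List.pySetD_of_nonneg, hp0]
    by_cases hmem : (n : Int) ∈ ps
    · simp only [hmem, if_true, List.mem_cons, or_true, if_true]
      rw [hset]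
      rcases Nat.lt_or_ge n vec.length with h | h
      · simp [h]
      · simp [List.getElem?_eq_none, h]
    · by_cases hpn : (n : Int) = p
      · have : n = p.toNat := by omega
        subst this
        simp only [List.mem_cons, hpn, true_or, if_true]
        rw [hset]
        rcases Nat.lt_or_ge p.toNat vec.length with h | h
        · simp [h]
        · simp [List.getElem?_eq_none, h]
      · simp only [List.mem_cons, hpn, hmem, or_self, if_false]
        rw [hset]
        have : p.toNat ≠ n := by omega
        simp [this]

theorem setAll_length (value : Int) (ps : List Int) (vec : List Int) :
    (ps.foldl (fun v p => PySem.List.pySetD v p value) vec).length = vec.length := by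
  induction ps generalizing vec with
  | nil => rfl
  | cons p ps ih => simp [List.foldl_cons, ih, PySem.List.length_pySetD]

theorem scatter_getElem? (pl : List Int) : ∀ (d : List (Int × Int)) (vec : List Int),
    vec.length = pl.length → (d.map Prod.fst).Nodup → ∀ n : Nat,
    (d.foldl (fun vec q => ((pvPos pl).getD q.1 []).foldl
        (fun v p => PySem.List.pySetD v p q.2) vec) vec)[n]? =
      pl[n]?.bind (fun x => vec[n]?.map (fun w => ((PySem.Dict.mk d).get? x).getD w)) := by
  intro d
  induction d with
  | nil =>
    intro vec hlen _ n
    have hE : (PySem.Dict.mk ([] : List (Int × Int))).get? = (PySem.Dict.empty : PySem.Dict Int Int).get? := rfl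
    rcases Nat.lt_or_ge n pl.length with h | h
    · simp [List.getElem?_eq_getElem, h, hlen ▸ h, hE, PySem.Dict.get?_empty]
    · simp [List.getElem?_eq_none, h, hlen ▸ h]
  | cons q rest ih =>
    obtain ⟨qk, qv⟩ := q
    intro vec hlen hnd n
    simp only [List.foldl_cons]
    have hnd2 : (qk :: rest.map Prod.fst).Nodup := by simpa using hnd
    have hnd' : (rest.map Prod.fst).Nodup := hnd2.of_cons
    have hq1 : qk ∉ rest.map Prod.fst := (List.nodup_cons.1 hnd2).1
    have hlen' : (((pvPos pl).getD qk []).foldl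
        (fun v p => PySem.List.pySetD v p qv) vec).length = pl.length := by
      rw [setAll_length]; exact hlen
    rw [ih _ hlen' hnd' n,
      setAll_getElem? qv ((pvPos pl).getD qk []) vec n (pvPos_nonneg pl qk)]
    rcases Nat.lt_or_ge n pl.length with h | h
    · have hpln : pl[n]? = some pl[n] := List.getElem?_eq_getElem h
      have hvecn : vec[n]? = some vec[n] := List.getElem?_eq_getElem (hlen ▸ h)
      have hmem : ((n : Int) ∈ (pvPos pl).getD qk []) ↔ pl[n] = qk := by
        rw [pvPos_mem]
        constructor
        · rintro ⟨k, ⟨_, hx⟩, hk⟩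
          have : n = k := by omega
          subst this; exact hx
        · intro hx; exact ⟨n, ⟨h, hx⟩, rfl⟩
      by_cases hx : pl[n] = qk
      · have hmemT : (n : Int) ∈ (pvPos pl).getD qk [] := hmem.2 hx
        have hnone : (PySem.Dict.mk rest).get? qk = none := by
          rw [PySem.Dict.get?_eq_none_iff_not_mem_keys]
          simpa using hq1
        rw [if_pos hmemT, hpln, hvecn]
        simp only [Option.map_some, Option.bind_some, PySem.Dict.get?_mk_cons, hx, hnone]
        simp
      · have hmemF : ¬ ((n : Int) ∈ (pvPos pl).getD qk []) := fun hh => hx (hmem.1 hh)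
        have hbeq : (qk == pl[n]) = false := by simp [Ne.symm hx]
        rw [if_neg hmemF, hpln, hvecn]
        simp only [Option.map_some, Option.bind_some, PySem.Dict.get?_mk_cons, hbeq]
        simp
    · simp [List.getElem?_eq_none, h, hlen ▸ h]

theorem scatter_eq_row (pl : List Int) (d : List (Int × Int))
    (hnd : (d.map Prod.fst).Nodup) :
    d.foldl (fun vec q =>
        ((pvPos pl).getD q.1 []).foldl (fun v p => PySem.List.pySetD v p q.2) vec)
      (List.replicate pl.length 0) = pvRow pl d := by
  apply List.ext_getElem?
  intro n
  rw [scatter_getElem? pl d (List.replicate pl.length 0) (by simp) hnd n]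
  unfold pvRow
  rcases Nat.lt_or_ge n pl.length with h | h
  · simp [List.getElem?_eq_getElem, h]
  · simp [List.getElem?_eq_none, h]

theorem coordinate_alt_eq_map (pluno_list : List Int) (fci : List (String × List (Int × Int)))
    (hin : ∀ pr ∈ fci, (pr.2.map Prod.fst).Nodup) :
    coordinate_alt pluno_list fci = fci.map (fun pr => (pr.1, pvRow pluno_list pr.2)) := by
  unfold coordinate_alt
  rw [PySem.List.foldl_append_singleton_eq_map]
  simp only [List.nil_append]
  apply List.map_congr_left
  intro pr hpr
  have := scatter_eq_row pluno_list pr.2 (hin pr hpr)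
  unfold pvPos at this
  rw [this]

theorem rowfun_eq (pl : List Int) (d : List (Int × Int)) :
    pl.foldl (fun row item =>
        if (d.map Prod.fst).contains item = false then row ++ [0]
        else row ++ [((PySem.Dict.mk d).get? item).getD 0]) [] = pvRow pl d := by
  have h1 : ∀ (row : List Int), ∀ item ∈ pl,
      (if (d.map Prod.fst).contains item = false then row ++ [0]
       else row ++ [((PySem.Dict.mk d).get? item).getD 0])
      = row ++ [((PySem.Dict.mk d).get? item).getD 0] := by
    intro row item _
    by_cases hc : (d.map Prod.fst).contains item = false
    · have hnone : (PySem.Dict.mk d).get? item = none := by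
        rw [PySem.Dict.get?_eq_none_iff_not_mem_keys]
        simpa using hc
      rw [if_pos hc, hnone]
      simp
    · rw [if_neg hc]
  have h2 : pl.foldl (fun row item =>
      if (d.map Prod.fst).contains item = false then row ++ [0]
      else row ++ [((PySem.Dict.mk d).get? item).getD 0]) []
      = pl.foldl (fun row item => row ++ [((PySem.Dict.mk d).get? item).getD 0]) [] :=
    PySem.List.foldl_congr_mem _ _ _ _ h1
  rw [h2, PySem.List.foldl_append_singleton_eq_map]
  simp [pvRow]

theorem coordinate_eq_map (pluno_list : List Int) (fci : List (String × List (Int × Int)))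
    (hnd : (fci.map Prod.fst).Nodup) :
    coordinate pluno_list fci = fci.map (fun pr => (pr.1, pvRow pluno_list pr.2)) := by
  unfold coordinate
  simp only []
  rw [PySem.Dict.keys_mk]
  have hitems := PySem.Dict.items_foldl_insert_fresh (l := fci.map Prod.fst) (k := fun a => a)
      (v := fun index => pluno_list.foldl (fun row item =>
        if ((((PySem.Dict.mk fci).get? index).getD []).map Prod.fst).contains item = false
        then row ++ [0]
        else row ++ [((PySem.Dict.mk (((PySem.Dict.mk fci).get? index).getD [])).get? item).getD 0]) [])
      (d := (PySem.Dict.empty : PySem.Dict String (List Int)))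
      (fun a _ => PySem.Dict.contains_empty a) (by simpa using hnd)
  rw [show (List.map Prod.fst fci) = (List.map (fun x => x.1) fci) from rfl] at hitems ⊢
  rw [hitems]
  simp only [show (PySem.Dict.empty : PySem.Dict String (List Int)).items = [] from rfl,
    List.nil_append, List.map_map]
  apply List.map_congr_left
  intro pr hpr
  have hget : (PySem.Dict.mk fci).get? pr.1 = some pr.2 := by
    apply PySem.Dict.get?_of_mem_items
    · simpa using hpr
    · simpa using hnd
  simp only [Function.comp_apply, hget, Option.getD_some]
  rw [rowfun_eq]

-- ===== VERDICT (by name: the statement is the Claim_ definition above) =====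
theorem coordinate_spec : Claim_equal_coordinate := by
  intro pl fci _ hpre
  unfold Spec_coordinate
  rw [coordinate_eq_map pl fci hpre.1, coordinate_alt_eq_map pl fci hpre.2]
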